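-- pv_equiv track=rewrite | github.com/mstieffe/deepMap | dbm/env.py | check
-- ===== SOURCE A (Python) =====
-- from collections import Counter
--
-- def check(list, elems, occ):
--     counter = Counter(list)
--     count = 0
--     for e in elems:
--         count += counter[e]
--     if count == occ:
--         return True
--     else:
--         return False
-- ===== SOURCE B (Python) =====
-- def check(list, elems, occ):
--     total = 0
--     for v in set(elems):
--         total += list.count(v) * elems.count(v)
--     return total == occ
-- ===== Notes on version B (the rewrite author's own statement) =====
-- stated objective: alternative
-- what changed: B replaces A's hash-count-then-stream scheme by grouping: it deduplicates elems into a set and, for each distinct value, adds list.count(v)*elems.count(v) (multiplying run multiplicities via linear scans) instead of building a Counter of list and summing per-occurrence lookups over elems.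
import Mathlib
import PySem

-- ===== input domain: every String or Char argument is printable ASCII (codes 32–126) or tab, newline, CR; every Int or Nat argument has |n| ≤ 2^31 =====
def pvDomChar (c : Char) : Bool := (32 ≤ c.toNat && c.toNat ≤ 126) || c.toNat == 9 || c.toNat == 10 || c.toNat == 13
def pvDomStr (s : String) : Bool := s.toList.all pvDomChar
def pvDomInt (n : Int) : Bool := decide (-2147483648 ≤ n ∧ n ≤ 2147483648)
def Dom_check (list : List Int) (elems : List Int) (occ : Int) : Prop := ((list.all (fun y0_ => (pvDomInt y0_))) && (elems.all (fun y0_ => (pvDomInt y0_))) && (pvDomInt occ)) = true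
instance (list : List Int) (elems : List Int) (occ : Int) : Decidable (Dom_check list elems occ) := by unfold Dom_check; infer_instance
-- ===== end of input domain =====

-- B groups elems by distinct value (a set) and adds list.count(v)*elems.count(v) per distinct value, instead of A's Counter of list streamed over elems; alternative decomposition, not claimed faster.


-- ===== PORT A =====
-- counter = Counter(list); count = 0; for e in elems: count += counter[e]; return True if count == occ else False
def check (list : List Int) (elems : List Int) (occ : Int) : Bool :=
  let counter := PySem.Dict.counter list
  let count := elems.foldl (fun count e => count + counter.getD e 0) 0
  if count = occ then true else false

-- ===== PORT B =====
-- total = 0; for v in set(elems): total += list.count(v) * elems.count(v); return total == occ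
-- (the loop's result is a sum of Ints, independent of Python's set iteration order)
def check_alt (list : List Int) (elems : List Int) (occ : Int) : Bool :=
  let total := (PySem.Set.ofList elems).foldl
    (fun total v => total + (PySem.List.count list v * PySem.List.count elems v : Int)) (0 : Int)
  total == occ

-- ===== PRECONDITION & SPEC =====
def Spec_check (list : List Int) (elems : List Int) (occ : Int) (out : Bool) : Prop := out = check_alt list elems occ
instance (list : List Int) (elems : List Int) (occ : Int) (out : Bool) : Decidable (Spec_check list elems occ out) := by unfold Spec_check; infer_instance

-- ===== CLAIM (what is proved, stated in full; the proofs are below) =====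
def Claim_equal_check : Prop := ∀ (list : List Int) (elems : List Int) (occ : Int), Dom_check list elems occ → Spec_check list elems occ (check list elems occ)

-- ===== LEMMAS AND PROOFS =====

-- grouping identity: summing f over es equals summing (count in es) * f over the distinct values of es
theorem pv_group (L es : List Int) :
    ((PySem.Set.ofList es).map (fun v => (L.count v : Int) * (es.count v : Int))).sum
      = (es.map (fun e => (L.count e : Int))).sum := by
  have hperm : List.Perm (PySem.Set.ofList es) es.dedup := by
    refine List.perm_of_nodup_nodup_toFinset_eq (PySem.Set.nodup_ofList es) es.nodup_dedup ?_
    ext a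
    simp [List.mem_toFinset, PySem.Set.mem_ofList, List.mem_dedup]
  rw [(hperm.map _).sum_eq]
  have hfin : es.dedup.toFinset = es.toFinset := by ext a; simp
  rw [← List.sum_toFinset _ es.nodup_dedup, hfin]
  rw [Finset.sum_list_map_count es (fun e => (L.count e : Int))]
  refine Finset.sum_congr rfl fun m _ => ?_
  simp [mul_comm]

theorem check_eq (list : List Int) (elems : List Int) (occ : Int) :
    check list elems occ = check_alt list elems occ := by
  simp only [check, check_alt]
  rw [PySem.List.foldl_add (g := fun e => (PySem.Dict.counter list).getD e 0),
      PySem.List.foldl_add (g := fun v => (PySem.List.count list v * PySem.List.count elems v : Int))]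
  simp only [PySem.Dict.getD_counter, PySem.List.count_eq, zero_add]
  rw [pv_group]
  rw [Bool.eq_iff_iff]
  simp

-- ===== VERDICT (by name: the statement is the Claim_ definition above) =====
theorem check_spec : Claim_equal_check := by
  intro list elems occ _
  exact check_eq list elems occ
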